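-- pv_equiv track=rewrite | github.com/turishev/py-harp | src/pyharp/scale.py | scale_degree_to_note
-- ===== SOURCE A (Python) =====
-- C_MAJOR_SCALE = [('c', 0), ('d', 2), ('e', 4), ('f', 5), ('g', 7), ('a', 9), ('b', 11)]
--
-- def scale_degree_to_note(interval : int) -> str:
--     if interval < 0: return ''
--     octave = interval // 12
--     step_chrom = interval % 12
--     if step_chrom == 0: step = 'c'
--     elif step_chrom <= 2: step = 'd'
--     elif step_chrom <= 4: step = 'e'
--     elif step_chrom <= 5: step = 'f'
--     elif step_chrom <= 7: step = 'g'
--     elif step_chrom <= 9: step = 'a'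
--     elif step_chrom <= 11: step = 'b'
--     else: step = ''
--
--     maj_steps = [p[1] for p in C_MAJOR_SCALE]
--     alt = 'b' if not step_chrom in maj_steps else ''
--
--     return step + alt + ('/' + str(octave + 1) if octave > 0 else '')
-- ===== SOURCE B (Python) =====
-- NOTE_TABLE = ['c', 'db', 'd', 'eb', 'e', 'f', 'gb', 'g', 'ab', 'a', 'bb', 'b']
--
-- def scale_degree_to_note(interval: int) -> str:
--     if interval < 0:
--         return ''
--     octave, step_chrom = divmod(interval, 12)
--     return NOTE_TABLE[step_chrom] + ('/' + str(octave + 1) if octave > 0 else '')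
-- ===== Notes on version B (the rewrite author's own statement) =====
-- stated objective: simpler
-- what changed: Replaces the seven-way if/elif cascade plus the maj_steps membership test computing the flat suffix with a single precomputed 12-entry table lookup indexed by interval % 12.
import Mathlib
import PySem

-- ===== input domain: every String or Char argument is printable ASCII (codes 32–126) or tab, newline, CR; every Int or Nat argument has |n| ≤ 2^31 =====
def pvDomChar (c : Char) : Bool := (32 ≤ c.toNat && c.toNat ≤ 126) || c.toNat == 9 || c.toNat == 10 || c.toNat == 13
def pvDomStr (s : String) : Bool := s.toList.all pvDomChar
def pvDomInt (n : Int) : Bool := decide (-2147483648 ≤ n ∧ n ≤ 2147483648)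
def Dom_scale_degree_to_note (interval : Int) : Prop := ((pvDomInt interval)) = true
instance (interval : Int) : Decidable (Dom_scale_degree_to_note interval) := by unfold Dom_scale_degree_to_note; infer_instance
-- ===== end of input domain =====

-- B replaces A's if/elif cascade and flat-suffix membership test by one 12-entry table lookup (simpler).

-- ===== PORT A =====
def C_MAJOR_SCALE : List (String × Int) :=
  [("c", 0), ("d", 2), ("e", 4), ("f", 5), ("g", 7), ("a", 9), ("b", 11)]

def scale_degree_to_note (interval : Int) : String :=
  if interval < 0 then "" else
  let octave := PySem.Int.floordiv interval 12
  let step_chrom := PySem.Int.mod interval 12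
  let step :=
    if step_chrom = 0 then "c"
    else if step_chrom ≤ 2 then "d"
    else if step_chrom ≤ 4 then "e"
    else if step_chrom ≤ 5 then "f"
    else if step_chrom ≤ 7 then "g"
    else if step_chrom ≤ 9 then "a"
    else if step_chrom ≤ 11 then "b"
    else ""
  let maj_steps := C_MAJOR_SCALE.map (fun p => p.2)
  let alt := if ¬ (step_chrom ∈ maj_steps) then "b" else ""
  step ++ alt ++ (if octave > 0 then "/" ++ PySem.Int.toStr (octave + 1) else "")

-- ===== PORT B =====
def NOTE_TABLE : List String :=
  ["c", "db", "d", "eb", "e", "f", "gb", "g", "ab", "a", "bb", "b"]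

def scale_degree_to_note_alt (interval : Int) : String :=
  if interval < 0 then "" else
  let octave := PySem.Int.floordiv interval 12
  let step_chrom := PySem.Int.mod interval 12
  -- NOTE_TABLE[step_chrom]: index 0 ≤ step_chrom < 12 is always in range, so pyGet? is some
  (PySem.List.pyGet? NOTE_TABLE step_chrom).getD "" ++
    (if octave > 0 then "/" ++ PySem.Int.toStr (octave + 1) else "")

-- ===== PRECONDITION & SPEC =====
def Spec_scale_degree_to_note (interval : Int) (out : String) : Prop := out = scale_degree_to_note_alt interval
instance (interval : Int) (out : String) : Decidable (Spec_scale_degree_to_note interval out) := by unfold Spec_scale_degree_to_note; infer_instance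

-- ===== CLAIM (what is proved, stated in full; the proofs are below) =====
def Claim_equal_scale_degree_to_note : Prop := ∀ (interval : Int), Dom_scale_degree_to_note interval → Spec_scale_degree_to_note interval (scale_degree_to_note interval)

-- ===== LEMMAS AND PROOFS =====

theorem scale_degree_to_note_eq (interval : Int) :
    scale_degree_to_note interval = scale_degree_to_note_alt interval := by
  by_cases hneg : interval < 0
  · simp [scale_degree_to_note, scale_degree_to_note_alt, hneg]
  · obtain ⟨k, hk12, hkeq⟩ : ∃ k : Nat, k < 12 ∧ PySem.Int.mod interval 12 = (k : Int) := by
      have h0 : (0:Int) ≤ PySem.Int.mod interval 12 := PySem.Int.mod_nonneg interval (by norm_num)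
      have h12 : PySem.Int.mod interval 12 < 12 := PySem.Int.mod_lt interval (by norm_num)
      exact ⟨(PySem.Int.mod interval 12).toNat, by omega, by omega⟩
    simp only [scale_degree_to_note, scale_degree_to_note_alt, hkeq, if_neg hneg]
    interval_cases k <;>
      norm_num [C_MAJOR_SCALE, NOTE_TABLE, PySem.List.pyGet?, PySem.List.pyIdx?] <;> decide

-- ===== VERDICT (by name: the statement is the Claim_ definition above) =====
theorem scale_degree_to_note_spec : Claim_equal_scale_degree_to_note := by
  intro interval _
  exact scale_degree_to_note_eq interval
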